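-- pv_equiv track=rewrite | github.com/miohsu/CodingInterviews | 05/05_1.py | change_space
-- ===== SOURCE A (Python) =====
-- def change_space(change_str, new_sub_str):
--     if not change_str:
--         return change_str
--     change_str = list(change_str)
--     new_sub_str = list(new_sub_str)
--     length = len(change_str)
--     change_counts = []
--
--     index = 0
--     while index < length:
--         if change_str[index] == ' ':
--             start = index
--             while index < length:
--                 if change_str[index] != ' ':
--                     break
--                 index += 1
--             change_counts.append((start, index))
--         else:
--             index += 1
--     while change_counts:
--         start, end = change_counts.pop()
--         change_str[start:end] = new_sub_str
--     return ''.join(change_str)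
-- ===== SOURCE B (Python) =====
-- import re
--
-- def change_space(change_str, new_sub_str):
--     # replace each maximal run of spaces with new_sub_str (replacement function
--     # so that backslashes in new_sub_str are inserted literally)
--     return re.sub(' +', lambda m: new_sub_str, change_str)
-- ===== Notes on version B (the rewrite author's own statement) =====
-- stated objective: faster
-- what changed: A scans the string with Python index loops to collect all space-run intervals and then splices the substitute into a list copy back-to-front with slice assignments; B is a single re.sub(' +', lambda m: new_sub_str, change_str) call that lets the regex engine replace each maximal space run in one pass.
import Mathlib
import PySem

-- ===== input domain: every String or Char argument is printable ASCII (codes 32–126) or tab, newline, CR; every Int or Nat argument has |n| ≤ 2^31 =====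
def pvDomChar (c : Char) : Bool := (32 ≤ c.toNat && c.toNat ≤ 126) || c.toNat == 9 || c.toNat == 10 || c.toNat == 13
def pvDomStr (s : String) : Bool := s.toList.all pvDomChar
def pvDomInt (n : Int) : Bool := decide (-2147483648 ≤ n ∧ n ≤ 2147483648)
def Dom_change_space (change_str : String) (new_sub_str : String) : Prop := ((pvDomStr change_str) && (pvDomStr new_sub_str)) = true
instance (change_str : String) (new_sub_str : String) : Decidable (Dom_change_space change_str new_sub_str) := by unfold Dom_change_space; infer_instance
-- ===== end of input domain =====

-- B replaces A's two-phase scheme (collect space-run intervals in Python loops, then splice them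
-- back-to-front with slice assignments) by a single re.sub(' +', ...) call; objective: faster.

-- ===== PORT A =====

-- inner while: advance index while it points at a space
def skipA (cs : List Char) (len i : Nat) : Nat :=
  if _h : i < len then
    if cs.getD i ' ' ≠ ' ' then i else skipA cs len (i + 1)
  else i
termination_by len - i

theorem skipA_ge (cs : List Char) (len i : Nat) : i ≤ skipA cs len i := by
  unfold skipA
  split
  · split
    · exact le_refl i
    · exact Nat.le_trans (Nat.le_succ i) (skipA_ge cs len (i + 1))
  · exact le_refl i
termination_by len - i

theorem skipA_gt (cs : List Char) (len i : Nat) (h : i < len) (hc : cs.getD i ' ' = ' ') :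
    i < skipA cs len i := by
  unfold skipA
  simp only [h, dif_pos, hc]
  simpa using Nat.lt_of_lt_of_le (Nat.lt_succ_self i) (skipA_ge cs len (i + 1))

-- outer while: collect (start, end) intervals of space runs
def collectA (cs : List Char) (len i : Nat) : List (Nat × Nat) :=
  if h : i < len then
    if hc : cs.getD i ' ' = ' ' then
      let j := skipA cs len i
      (i, j) :: collectA cs len j
    else collectA cs len (i + 1)
  else []
termination_by len - i
decreasing_by
  · have := skipA_gt cs len i h hc; omega
  · omega

-- 'while change_counts: start, end = change_counts.pop(); change_str[start:end] = new_sub_str'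
-- (pop takes the LAST interval; this recursion receives the reversed list)
def popLoop (ns : List Char) (cs : List Char) : List (Nat × Nat) → List Char
  | [] => cs
  | (s, e) :: rest => popLoop ns (cs.take s ++ ns ++ cs.drop e) rest

def change_space (change_str : String) (new_sub_str : String) : String :=
  if change_str = "" then change_str
  else
    let cs := change_str.toList
    let ns := new_sub_str.toList
    String.mk (popLoop ns cs ((collectA cs cs.length 0).reverse))

-- ===== PORT B =====

-- Hand port of Source B's `re.sub(' +', lambda m: new_sub_str, change_str)`.
-- Exact because the pattern ' +' matches precisely the maximal runs of spaces,
-- leftmost first, and the replacement function inserts new_sub_str literally: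
-- the scan below replaces each maximal space run and copies every other char.
def subSpaceRuns (ns : List Char) : List Char → List Char
  | [] => []
  | c :: rest =>
    if c = ' ' then ns ++ subSpaceRuns ns (rest.dropWhile (· = ' '))
    else c :: subSpaceRuns ns rest
termination_by l => l.length
decreasing_by
  · exact Nat.lt_succ_of_le (List.length_dropWhile_le _ _)
  · simp

def change_space_alt (change_str : String) (new_sub_str : String) : String :=
  String.mk (subSpaceRuns new_sub_str.toList change_str.toList)

-- ===== PRECONDITION & SPEC =====
def Spec_change_space (change_str : String) (new_sub_str : String) (out : String) : Prop := out = change_space_alt change_str new_sub_str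
instance (change_str : String) (new_sub_str : String) (out : String) : Decidable (Spec_change_space change_str new_sub_str out) := by unfold Spec_change_space; infer_instance

-- ===== CLAIM (what is proved, stated in full; the proofs are below) =====
def Claim_equal_change_space : Prop := ∀ (change_str : String) (new_sub_str : String), Dom_change_space change_str new_sub_str → Spec_change_space change_str new_sub_str (change_space change_str new_sub_str)

-- ===== LEMMAS AND PROOFS =====

theorem drop_cons_getD (cs : List Char) (i : Nat) (h : i < cs.length) :
    cs.drop i = cs.getD i ' ' :: cs.drop (i + 1) := by
  rw [List.getD_eq_getElem cs ' ' h]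
  exact List.drop_eq_getElem_cons h

theorem skipA_spec (cs : List Char) (i : Nat) (h : i ≤ cs.length) :
    skipA cs cs.length i = i + ((cs.drop i).takeWhile (· = ' ')).length := by
  unfold skipA
  split
  · rename_i hi
    rw [drop_cons_getD cs i hi]
    by_cases hc : cs.getD i ' ' = ' '
    · have hc' : cs[i]?.getD ' ' = ' ' := hc
      rw [if_neg (by simp [hc'])]
      rw [skipA_spec cs (i + 1) hi, List.takeWhile_cons]
      simp [hc']; omega
    · rw [if_pos (by simpa using hc), List.takeWhile_cons, if_neg (by simpa using hc)]
      simp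
  · rename_i hi
    have : i = cs.length := by omega
    subst this
    simp [List.drop_length]
termination_by cs.length - i

theorem drop_len_takeWhile (p : Char → Bool) (l : List Char) :
    l.drop (l.takeWhile p).length = l.dropWhile p := by
  induction l with
  | nil => rfl
  | cons c rest ih =>
    simp only [List.takeWhile_cons, List.dropWhile_cons]
    by_cases hp : p c
    · simp [hp, ih]
    · simp [hp]

theorem drop_skip_eq_dropWhile (cs : List Char) (i : Nat) (h : i ≤ cs.length) :
    cs.drop (skipA cs cs.length i) = (cs.drop i).dropWhile (· = ' ') := by
  rw [skipA_spec cs i h, ← List.drop_drop, drop_len_takeWhile]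

theorem popLoop_append (ns cs : List Char) (l1 l2 : List (Nat × Nat)) :
    popLoop ns cs (l1 ++ l2) = popLoop ns (popLoop ns cs l1) l2 := by
  induction l1 generalizing cs with
  | nil => rfl
  | cons p rest ih => cases p; simp [popLoop, ih]

theorem skipA_le (cs : List Char) (i : Nat) (h : i ≤ cs.length) :
    skipA cs cs.length i ≤ cs.length := by
  rw [skipA_spec cs i h]
  have := (List.takeWhile_prefix (l := cs.drop i) (· = ' ')).length_le
  simp only [List.length_drop] at this
  omega

theorem mainA (cs ns : List Char) : ∀ (k i : Nat), cs.length - i ≤ k → i ≤ cs.length →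
    popLoop ns cs ((collectA cs cs.length i).reverse) = cs.take i ++ subSpaceRuns ns (cs.drop i) := by
  intro k
  induction k with
  | zero =>
    intro i hk h
    have : i = cs.length := by omega
    subst this
    unfold collectA
    simp [popLoop, subSpaceRuns]
  | succ k ih =>
    intro i hk h
    by_cases hi : i < cs.length
    · have hdrop := drop_cons_getD cs i hi
      unfold collectA
      simp only [dif_pos hi]
      by_cases hc : cs.getD i ' ' = ' '
      · simp only [dif_pos hc, List.reverse_cons, popLoop_append]
        set j := skipA cs cs.length i with hj
        have hij : i < j := skipA_gt cs cs.length i hi hc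
        have hjle : j ≤ cs.length := skipA_le cs i (le_of_lt hi)
        have hk'' : cs.length - j ≤ k := by omega
        rw [ih j hk'' hjle]
        simp only [popLoop]
        have htakei : (cs.take j ++ subSpaceRuns ns (cs.drop j)).take i = cs.take i := by
          rw [List.take_append_of_le_length (by simp; omega), List.take_take]
          congr 1; omega
        have hlenj : (cs.take j).length = j := by simp; omega
        have hdropj : (cs.take j ++ subSpaceRuns ns (cs.drop j)).drop j = subSpaceRuns ns (cs.drop j) :=
          List.drop_left' hlenj
        rw [htakei, hdropj]
        rw [hdrop, subSpaceRuns]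
        simp only [if_pos hc]
        have : cs.drop j = (cs.drop i).dropWhile (· = ' ') := drop_skip_eq_dropWhile cs i (le_of_lt hi)
        rw [hdrop] at this
        rw [List.dropWhile_cons_of_pos (by simpa using hc)] at this
        rw [this, List.append_assoc]
      · simp only [dif_neg hc]
        have hk' : cs.length - (i + 1) ≤ k := by omega
        rw [ih (i + 1) hk' hi]
        rw [hdrop, subSpaceRuns]
        simp only [if_neg hc]
        rw [List.take_add_one, List.getElem?_eq_getElem hi, ← List.getD_eq_getElem cs ' ' hi]
        simp
    · have : i = cs.length := by omega
      subst this
      unfold collectA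
      simp [popLoop, subSpaceRuns]

-- ===== VERDICT (by name: the statement is the Claim_ definition above) =====
theorem change_space_spec : Claim_equal_change_space := by
  intro c n _
  unfold Spec_change_space change_space change_space_alt
  by_cases hc : c = ""
  · subst hc
    rw [if_pos rfl]
    have h0 : ("" : String).toList = [] := rfl
    rw [h0]
    have h1 : subSpaceRuns n.toList [] = [] := by simp [subSpaceRuns]
    rw [h1]
    rfl
  · simp only [if_neg hc]
    rw [mainA c.toList n.toList c.toList.length 0 (by omega) (by omega)]
    simp
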